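-- pv_equiv track=rewrite | github.com/Shubh02082002/filtr | backend/cluster.py | _flag_duplicate_names
-- ===== SOURCE A (Python) =====
-- from typing import List, Dict, Tuple
--
-- def _flag_duplicate_names(names: List[str]) -> List[str]:
--     """
--     If two cluster names share 3+ consecutive words, the second one
--     is likely a near-duplicate cluster. Flag it as Unclassified.
--     """
--     result = list(names)
--     for i in range(len(result)):
--         for j in range(i + 1, len(result)):
--             words_i = result[i].lower().split()
--             words_j = result[j].lower().split()
--             # Check for 3+ consecutive word overlap
--             consecutive = 0
--             max_consecutive = 0
--             for w in words_i:
--                 if w in words_j: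
--                     consecutive += 1
--                     max_consecutive = max(max_consecutive, consecutive)
--                 else:
--                     consecutive = 0
--             if max_consecutive >= 3:
--                 result[j] = f"Unclassified Theme {j+1}"
--     return result
-- ===== SOURCE B (Python) =====
-- from typing import List
--
-- def _flag_duplicate_names(names: List[str]) -> List[str]:
--     """Same flagging rule via precomputed word triples + set membership:
--     a max consecutive-overlap run >= 3 holds iff some window of three
--     consecutive words of name i all occur among name j's words."""
--     result = list(names)
--     n = len(result)
--     for i in range(n):
--         wi = result[i].lower().split()
--         triples = list(zip(wi, wi[1:], wi[2:]))
--         for j in range(i + 1, n):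
--             wj = set(result[j].lower().split())
--             if any(a in wj and b in wj and c in wj for a, b, c in triples):
--                 result[j] = f"Unclassified Theme {j+1}"
--     return result
-- ===== Notes on version B (the rewrite author's own statement) =====
-- stated objective: simpler
-- what changed: Replaces A's per-pair running-counter/max-consecutive accumulator loop with word triples of name i precomputed once per outer index (hoisted out of the j loop) and a sliding-window any/all membership test against a set of name j's words, using the fact that a max consecutive-overlap run >= 3 holds iff some window of three consecutive words of i all occur among j's words.
import Mathlib
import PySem

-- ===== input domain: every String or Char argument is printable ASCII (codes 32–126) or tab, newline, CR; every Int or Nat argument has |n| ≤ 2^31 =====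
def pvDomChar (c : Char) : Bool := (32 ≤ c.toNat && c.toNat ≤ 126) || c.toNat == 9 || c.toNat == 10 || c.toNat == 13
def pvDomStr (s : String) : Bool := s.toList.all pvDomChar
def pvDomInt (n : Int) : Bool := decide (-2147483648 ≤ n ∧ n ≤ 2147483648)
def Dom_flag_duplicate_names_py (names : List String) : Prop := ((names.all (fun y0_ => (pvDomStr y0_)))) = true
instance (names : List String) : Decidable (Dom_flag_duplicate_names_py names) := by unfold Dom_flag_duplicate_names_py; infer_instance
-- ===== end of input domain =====

-- B replaces A's running-counter/max scan by precomputed word triples checked against a set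
-- (objective: simpler inner logic); proved to return the same list on every input.

-- ===== PORT A =====
-- shared helper: `s.lower().split()`
def pvLowSplit (s : String) : List String := PySem.Str.split₀ (PySem.Str.lower s)
-- shared helper: the flag string f"Unclassified Theme {j+1}"
def pvUnclass (j : Nat) : String := "Unclassified Theme " ++ PySem.Int.toStr ((j : Int) + 1)

def flag_duplicate_names_py (names : List String) : List String :=
  (List.range names.length).foldl
    (fun result i =>
      (List.range' (i + 1) (result.length - (i + 1))).foldl
        (fun res j =>
          let words_i := pvLowSplit (res.getD i "")
          let words_j := pvLowSplit (res.getD j "")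
          let cm := words_i.foldl
            (fun (st : Int × Int) w =>
              if words_j.contains w then (st.1 + 1, max st.2 (st.1 + 1))
              else (0, st.2)) (0, 0)
          if cm.2 ≥ 3 then res.set j (pvUnclass j) else res)
        result)
    names

-- ===== PORT B =====
-- port of `list(zip(wi, wi[1:], wi[2:]))`: the list of consecutive word triples (exact)
def pvWindows3 : List String → List (String × String × String)
  | a :: b :: c :: t => (a, b, c) :: pvWindows3 (b :: c :: t)
  | _ => []

def flag_duplicate_names_py_alt (names : List String) : List String :=
  (List.range names.length).foldl
    (fun result i =>
      let wi := pvLowSplit (result.getD i "")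
      let triples := pvWindows3 wi
      (List.range' (i + 1) (result.length - (i + 1))).foldl
        (fun res j =>
          let wj := PySem.Set.ofList (pvLowSplit (res.getD j ""))
          if triples.any (fun t => PySem.Set.contains wj t.1 &&
              PySem.Set.contains wj t.2.1 && PySem.Set.contains wj t.2.2)
          then res.set j (pvUnclass j) else res)
        result)
    names

-- ===== PRECONDITION & SPEC =====
def Spec_flag_duplicate_names_py (names : List String) (out : List String) : Prop := out = flag_duplicate_names_py_alt names
instance (names : List String) (out : List String) : Decidable (Spec_flag_duplicate_names_py names out) := by unfold Spec_flag_duplicate_names_py; infer_instance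

-- ===== CLAIM (what is proved, stated in full; the proofs are below) =====
def Claim_equal_flag_duplicate_names_py : Prop := ∀ (names : List String), Dom_flag_duplicate_names_py names → Spec_flag_duplicate_names_py names (flag_duplicate_names_py names)

-- ===== LEMMAS AND PROOFS =====

-- A's run counter, abstracted over the per-word membership flags
def pvStepRun (st : Int × Int) (b : Bool) : Int × Int :=
  if b then (st.1 + 1, max st.2 (st.1 + 1)) else (0, st.2)

-- "some window of three consecutive flags is all-true"
def pvWin3 : List Bool → Bool
  | a :: b :: c :: t => (a && b && c) || pvWin3 (b :: c :: t)
  | _ => false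

-- "the first n flags exist and are all true"
def pvPrefT : Nat → List Bool → Bool
  | 0, _ => true
  | _ + 1, [] => false
  | n + 1, b :: t => b && pvPrefT n t

lemma pvWin3_cons (a : Bool) (t : List Bool) :
    pvWin3 (a :: t) = (pvPrefT 3 (a :: t) || pvWin3 t) := by
  match t with
  | [] => simp [pvWin3, pvPrefT]
  | [x] => simp [pvWin3, pvPrefT]
  | x :: y :: r => simp [pvWin3, pvPrefT, Bool.and_assoc]

lemma pvPrefT_succ (n : Nat) : ∀ (l : List Bool), pvPrefT (n + 1) l = true → pvPrefT n l = true := by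
  induction n with
  | zero => intro l _; rfl
  | succ k ih =>
    intro l h
    match l with
    | [] => exact absurd h (by simp [pvPrefT])
    | b :: t =>
      simp only [pvPrefT, Bool.and_eq_true] at h ⊢
      exact ⟨h.1, ih t h.2⟩

lemma pvPrefT3_win3 (l : List Bool) (h : pvPrefT 3 l = true) : pvWin3 l = true := by
  match l with
  | [] => exact absurd h (by simp [pvPrefT])
  | a :: t => rw [pvWin3_cons, h]; rfl

lemma pvRun_lemma : ∀ (l : List Bool) (c m : Int), 0 ≤ c → c ≤ m →
    ((l.foldl pvStepRun (c, m)).2 ≥ 3 ↔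
      m ≥ 3 ∨ pvPrefT (3 - c).toNat l = true ∨ pvWin3 l = true) := by
  intro l
  induction l with
  | nil =>
    intro c m hc hcm
    by_cases h3 : c ≥ 3
    · have : (3 - c).toNat = 0 := by omega
      simp [this, pvPrefT, pvWin3]
      omega
    · have : (3 - c).toNat ≠ 0 := by omega
      obtain ⟨k, hk⟩ := Nat.exists_eq_succ_of_ne_zero this
      simp [List.foldl, hk, pvPrefT, pvWin3]
  | cons b t ih =>
    intro c m hc hcm
    cases b with
    | true =>
      have step : pvStepRun (c, m) true = (c + 1, max m (c + 1)) := rfl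
      rw [List.foldl_cons, step,
        ih (c + 1) (max m (c + 1)) (by omega) (le_max_right _ _)]
      rw [pvWin3_cons]
      by_cases h3 : c ≥ 3
      · have h0 : (3 - (c + 1)).toNat = 0 := by omega
        have h0' : (3 - c).toNat = 0 := by omega
        simp only [h0, h0', pvPrefT]
        constructor
        · intro _; left; omega
        · intro _; left; omega
      · interval_cases c
        · -- c = 0
          have h1 : ((3 : Int) - (0 + 1)).toNat = 2 := by decide
          have h2 : ((3 : Int) - 0).toNat = 3 := by decide
          have hmax : max m (0 + 1) ≥ 3 ↔ m ≥ 3 := by omega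
          rw [h1, h2, hmax]
          simp only [pvPrefT, Bool.true_and, Bool.or_eq_true]
          tauto
        · -- c = 1
          have h1 : ((3 : Int) - (1 + 1)).toNat = 1 := by decide
          have h2 : ((3 : Int) - 1).toNat = 2 := by decide
          have hmax : max m (1 + 1) ≥ 3 ↔ m ≥ 3 := by omega
          have hps : pvPrefT (1 + 1) t = true → pvPrefT 1 t = true := pvPrefT_succ 1 t
          rw [h1, h2, hmax]
          simp only [pvPrefT, Bool.true_and, Bool.or_eq_true]
          tauto
        · -- c = 2
          have h1 : ((3 : Int) - (2 + 1)).toNat = 0 := by decide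
          have h2 : ((3 : Int) - 2).toNat = 1 := by decide
          have hmax : max m (2 + 1) ≥ 3 := by omega
          rw [h1, h2]
          simp [pvPrefT]
    | false =>
      have step : pvStepRun (c, m) false = (0, m) := rfl
      rw [List.foldl_cons, step, ih 0 m le_rfl (by omega)]
      rw [pvWin3_cons]
      have h3' : ((3 : Int) - 0).toNat = 3 := by decide
      by_cases h3 : c ≥ 3
      · have h0 : (3 - c).toNat = 0 := by omega
        simp only [h0, h3', pvPrefT]
        constructor
        · intro _; left; omega
        · intro _; left; omega
      · have : (3 - c).toNat ≠ 0 := by omega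
        obtain ⟨k, hk⟩ := Nat.exists_eq_succ_of_ne_zero this
        rw [h3', hk]
        simp only [pvPrefT, Bool.false_and, Bool.or_eq_true]
        have hw : pvPrefT 3 t = true → pvWin3 t = true := pvPrefT3_win3 t
        have hfalse : (false = true) ↔ False := by simp
        tauto

-- set membership agrees with list membership
lemma pvSet_contains (l : List String) (x : String) :
    PySem.Set.contains (PySem.Set.ofList l) x = l.contains x := by
  unfold PySem.Set.contains
  simp only [List.contains_eq_mem, decide_eq_decide]
  exact PySem.Set.mem_ofList l x

-- B's window scan over triples equals pvWin3 over the membership flags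
lemma pvWindows_any (p : String → Bool) : ∀ (l : List String),
    (pvWindows3 l).any (fun t => p t.1 && p t.2.1 && p t.2.2) = pvWin3 (l.map p) := by
  intro l
  induction l using pvWindows3.induct with
  | case1 a b c t ih => simp [pvWindows3, pvWin3, List.any_cons, ih]
  | case2 l h =>
    match l with
    | [] => simp [pvWindows3, pvWin3]
    | [a] => simp [pvWindows3, pvWin3]
    | [a, b] => simp [pvWindows3, pvWin3]
    | a :: b :: c :: t => exact absurd rfl (h a b c t)

-- per-pair condition: A's max-run test equals B's triple test
lemma pvPair_eq (si sj : String) :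
    (((pvLowSplit si).foldl
        (fun (st : Int × Int) w =>
          if (pvLowSplit sj).contains w then (st.1 + 1, max st.2 (st.1 + 1))
          else (0, st.2)) (0, 0)).2 ≥ 3) ↔
    ((pvWindows3 (pvLowSplit si)).any (fun t =>
        PySem.Set.contains (PySem.Set.ofList (pvLowSplit sj)) t.1 &&
        PySem.Set.contains (PySem.Set.ofList (pvLowSplit sj)) t.2.1 &&
        PySem.Set.contains (PySem.Set.ofList (pvLowSplit sj)) t.2.2) = true) := by
  have hmap : (pvLowSplit si).foldl
      (fun (st : Int × Int) w =>
        if (pvLowSplit sj).contains w then (st.1 + 1, max st.2 (st.1 + 1))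
        else (0, st.2)) (0, 0)
      = ((pvLowSplit si).map (fun w => (pvLowSplit sj).contains w)).foldl pvStepRun (0, 0) := by
    rw [List.foldl_map]; rfl
  rw [hmap, pvRun_lemma _ 0 0 le_rfl le_rfl]
  have : (pvWindows3 (pvLowSplit si)).any (fun t =>
      PySem.Set.contains (PySem.Set.ofList (pvLowSplit sj)) t.1 &&
      PySem.Set.contains (PySem.Set.ofList (pvLowSplit sj)) t.2.1 &&
      PySem.Set.contains (PySem.Set.ofList (pvLowSplit sj)) t.2.2)
      = pvWin3 ((pvLowSplit si).map (fun w => (pvLowSplit sj).contains w)) := by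
    rw [← pvWindows_any]
    simp only [pvSet_contains]
  rw [this]
  constructor
  · rintro (h | h | h)
    · omega
    · have h2 : ((3 : Int) - 0).toNat = 3 := by decide
      rw [h2] at h
      exact pvPrefT3_win3 _ h
    · exact h
  · intro h; right; right; exact h

-- inner-loop bodies of the two ports, as named functions (definitionally the port lambdas)
def pvBodyA (i : Nat) (res : List String) (j : Nat) : List String :=
  if ((pvLowSplit (res.getD i "")).foldl
      (fun (st : Int × Int) w =>
        if (pvLowSplit (res.getD j "")).contains w then (st.1 + 1, max st.2 (st.1 + 1))
        else (0, st.2)) (0, 0)).2 ≥ 3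
  then res.set j (pvUnclass j) else res

def pvBodyB (tr : List (String × String × String)) (res : List String) (j : Nat) : List String :=
  if tr.any (fun t => PySem.Set.contains (PySem.Set.ofList (pvLowSplit (res.getD j ""))) t.1 &&
      PySem.Set.contains (PySem.Set.ofList (pvLowSplit (res.getD j ""))) t.2.1 &&
      PySem.Set.contains (PySem.Set.ofList (pvLowSplit (res.getD j ""))) t.2.2)
  then res.set j (pvUnclass j) else res

lemma pvBody_eq (i : Nat) (tr : List (String × String × String)) (res : List String) (j : Nat)
    (htr : tr = pvWindows3 (pvLowSplit (res.getD i ""))) :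
    pvBodyA i res j = pvBodyB tr res j := by
  subst htr
  unfold pvBodyA pvBodyB
  exact if_congr (pvPair_eq (res.getD i "") (res.getD j "")) rfl rfl

lemma pvBodyB_getD (tr : List (String × String × String)) (res : List String) (i j : Nat)
    (hji : j ≠ i) : (pvBodyB tr res j).getD i "" = res.getD i "" := by
  unfold pvBodyB
  split
  · simp only [List.getD_eq_getElem?_getD, List.getElem?_set_ne hji]
  · rfl

-- during the inner loop, entry i is never overwritten, so B's hoisted triples stay valid
lemma pvInner_eq (i : Nat) : ∀ (js : List Nat) (res : List String)
    (tr : List (String × String × String)),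
    (∀ j ∈ js, j ≠ i) →
    tr = pvWindows3 (pvLowSplit (res.getD i "")) →
    js.foldl (pvBodyA i) res = js.foldl (pvBodyB tr) res := by
  intro js
  induction js with
  | nil => intro res tr _ _; rfl
  | cons j js ih =>
    intro res tr hne htr
    have hji : j ≠ i := hne j (List.mem_cons_self)
    rw [List.foldl_cons, List.foldl_cons, pvBody_eq i tr res j htr]
    exact ih (pvBodyB tr res j) tr
      (fun x hx => hne x (List.mem_cons_of_mem j hx))
      (by rw [pvBodyB_getD tr res i j hji, htr])

-- ===== VERDICT (by name: the statement is the Claim_ definition above) =====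
theorem flag_duplicate_names_py_spec : Claim_equal_flag_duplicate_names_py := by
  intro names _
  unfold Spec_flag_duplicate_names_py flag_duplicate_names_py flag_duplicate_names_py_alt
  apply List.foldl_ext
  intro result i _
  exact pvInner_eq i (List.range' (i + 1) (result.length - (i + 1))) result _
    (fun j hj => by have := List.mem_range'_1.mp hj; omega) rfl
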